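-- pv_equiv track=rewrite | github.com/rubelw/OSSS | src/OSSS/ai/agents/query_data/handlers/entity_tags_handler.py | _select_entity_tags_fields
-- ===== SOURCE A (Python) =====
-- from typing import Any, Dict, List, Sequence
--
-- def _select_entity_tags_fields(
--     rows: Sequence[Dict[str, Any]],
-- ) -> List[str]:
--     """
--     Pick a stable column order for entity_tags, but keep any extra keys.
--     """
--     if not rows:
--         return []
--
--     preferred_order = [
--         "id",
--         "entity_type",      # folder, file, student, staff, etc.
--         "entity_id",
--         "entity_display_name",
--         "tag_id",
--         "tag_name",
--         "tag_code",
--         "tag_category",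
--         "tag_scope",        # dcg, school, program, etc.
--         "source",           # manual, import, rule_engine, etc.
--         "school_year",
--         "is_primary",
--         "is_active",
--         "created_by",
--         "created_at",
--         "updated_at",
--     ]
--
--     all_keys: List[str] = []
--     for r in rows:
--         for k in r:
--             if k not in all_keys:
--                 all_keys.append(k)
--
--     ordered = [k for k in preferred_order if k in all_keys]
--     ordered.extend(k for k in all_keys if k not in ordered)
--     return ordered
-- ===== SOURCE B (Python) =====
-- from typing import Any, Dict, List, Sequence
--
-- def _select_entity_tags_fields(
--     rows: Sequence[Dict[str, Any]],
-- ) -> List[str]: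
--     """
--     Pick a stable column order for entity_tags, but keep any extra keys.
--
--     Single pass: each new key is dropped into the bucket of its preferred
--     rank (extras into the last bucket), then the buckets are concatenated.
--     """
--     if not rows:
--         return []
--
--     preferred_order = [
--         "id",
--         "entity_type",
--         "entity_id",
--         "entity_display_name",
--         "tag_id",
--         "tag_name",
--         "tag_code",
--         "tag_category",
--         "tag_scope",
--         "source",
--         "school_year",
--         "is_primary",
--         "is_active",
--         "created_by",
--         "created_at",
--         "updated_at",
--     ]
--     n = len(preferred_order)
--     rank = {k: i for i, k in enumerate(preferred_order)}
--
--     buckets: List[List[str]] = [[] for _ in range(n + 1)]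
--     seen = set()
--     for r in rows:
--         for k in r:
--             if k not in seen:
--                 seen.add(k)
--                 buckets[rank.get(k, n)].append(k)
--
--     out: List[str] = []
--     for b in buckets:
--         out.extend(b)
--     return out
-- ===== Notes on version B (the rewrite author's own statement) =====
-- stated objective: faster
-- what changed: Replaces A's quadratic dedup-into-a-list plus two filtering passes by a single pass that drops each first-seen key (set-deduped) into the bucket of its preferred rank (extras into a last bucket) and concatenates the buckets.
import Mathlib
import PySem

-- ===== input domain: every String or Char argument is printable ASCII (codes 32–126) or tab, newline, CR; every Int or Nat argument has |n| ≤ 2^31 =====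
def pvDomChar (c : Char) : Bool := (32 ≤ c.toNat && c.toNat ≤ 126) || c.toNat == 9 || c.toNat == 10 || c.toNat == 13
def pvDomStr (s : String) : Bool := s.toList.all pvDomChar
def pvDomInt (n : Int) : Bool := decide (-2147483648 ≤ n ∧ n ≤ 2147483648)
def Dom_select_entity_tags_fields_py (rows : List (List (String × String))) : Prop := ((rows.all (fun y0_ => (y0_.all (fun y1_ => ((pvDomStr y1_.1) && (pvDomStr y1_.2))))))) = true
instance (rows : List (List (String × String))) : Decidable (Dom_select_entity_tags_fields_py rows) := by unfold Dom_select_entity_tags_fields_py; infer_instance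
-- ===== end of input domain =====

-- B replaces A's quadratic list-membership dedup plus two filtering passes by one pass
-- dropping each first-seen key into the bucket of its preferred rank; same return value.

-- the `preferred_order` literal both Pythons contain
def pvPreferred : List String := ["id","entity_type","entity_id","entity_display_name","tag_id","tag_name","tag_code","tag_category","tag_scope","source","school_year","is_primary","is_active","created_by","created_at","updated_at"]

-- ===== PORT A =====
def select_entity_tags_fields_py (rows : List (List (String × String))) : List String :=
  if rows = [] then []
  else
    -- all_keys: for r in rows: for k in r: if k not in all_keys: all_keys.append(k)
    let all_keys : List String :=
      rows.foldl (fun acc r => r.foldl (fun acc kv => if kv.1 ∈ acc then acc else acc ++ [kv.1]) acc) []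
    -- ordered = [k for k in preferred_order if k in all_keys]
    let ordered : List String := pvPreferred.filter (fun k => k ∈ all_keys)
    -- ordered.extend(k for k in all_keys if k not in ordered)  (the generator reads the growing list)
    all_keys.foldl (fun ordered k => if k ∈ ordered then ordered else ordered ++ [k]) ordered

-- ===== PORT B =====
-- n = len(preferred_order)
def pvN : Nat := pvPreferred.length
-- rank = {k: i for i, k in enumerate(preferred_order)}
def pvRank : PySem.Dict String Int := (PySem.List.enumerate pvPreferred 0).foldl (fun d p => d.insert p.2 p.1) PySem.Dict.empty
-- rank.get(k, n); the value is always in [0, n], so .toNat is exact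
def pvRnk (k : String) : Nat := (PySem.Dict.getD pvRank k (pvN : Int)).toNat

def select_entity_tags_fields_py_alt (rows : List (List (String × String))) : List String :=
  if rows = [] then []
  else
    -- buckets = [[] for _ in range(n + 1)]; seen = set()
    -- for r in rows: for k in r: if k not in seen: seen.add(k); buckets[rank.get(k, n)].append(k)
    let st : PySem.Set String × List (List String) :=
      rows.foldl (fun st r =>
        r.foldl (fun (st : PySem.Set String × List (List String)) kv =>
          if PySem.Set.contains st.1 kv.1 then st
          else (PySem.Set.add st.1 kv.1,
                st.2.set (pvRnk kv.1) (st.2.getD (pvRnk kv.1) [] ++ [kv.1]))) st)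
        (PySem.Set.empty, List.replicate (pvN + 1) [])
    -- out = []; for b in buckets: out.extend(b)
    st.2.foldl (fun out b => out ++ b) []

-- ===== PRECONDITION & SPEC =====
def Spec_select_entity_tags_fields_py (rows : List (List (String × String))) (out : List String) : Prop := out = select_entity_tags_fields_py_alt rows
instance (rows : List (List (String × String))) (out : List String) : Decidable (Spec_select_entity_tags_fields_py rows out) := by unfold Spec_select_entity_tags_fields_py; infer_instance

-- ===== CLAIM (what is proved, stated in full; the proofs are below) =====
def Claim_equal_select_entity_tags_fields_py : Prop := ∀ (rows : List (List (String × String))), Dom_select_entity_tags_fields_py rows → Spec_select_entity_tags_fields_py rows (select_entity_tags_fields_py rows)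

-- ===== LEMMAS AND PROOFS =====

theorem pvRank_eq : pvRank = PySem.Dict.mk [("id",0),("entity_type",1),("entity_id",2),("entity_display_name",3),("tag_id",4),("tag_name",5),("tag_code",6),("tag_category",7),("tag_scope",8),("source",9),("school_year",10),("is_primary",11),("is_active",12),("created_by",13),("created_at",14),("updated_at",15)] := by decide

theorem pvRnk_eq_idxOf (k : String) : pvRnk k = pvPreferred.idxOf k := by
  by_cases h0 : k = "id"
  · subst h0; decide
  by_cases h1 : k = "entity_type"
  · subst h1; decide
  by_cases h2 : k = "entity_id"
  · subst h2; decide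
  by_cases h3 : k = "entity_display_name"
  · subst h3; decide
  by_cases h4 : k = "tag_id"
  · subst h4; decide
  by_cases h5 : k = "tag_name"
  · subst h5; decide
  by_cases h6 : k = "tag_code"
  · subst h6; decide
  by_cases h7 : k = "tag_category"
  · subst h7; decide
  by_cases h8 : k = "tag_scope"
  · subst h8; decide
  by_cases h9 : k = "source"
  · subst h9; decide
  by_cases h10 : k = "school_year"
  · subst h10; decide
  by_cases h11 : k = "is_primary"
  · subst h11; decide
  by_cases h12 : k = "is_active"
  · subst h12; decide
  by_cases h13 : k = "created_by"
  · subst h13; decide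
  by_cases h14 : k = "created_at"
  · subst h14; decide
  by_cases h15 : k = "updated_at"
  · subst h15; decide
  simp only [pvRnk, pvRank_eq, PySem.Dict.getD_eq_get?_getD, PySem.Dict.get?_mk_cons, beq_iff_eq, pvPreferred, List.idxOf, List.findIdx_cons]
  rw [if_neg (Ne.symm h0), if_neg (Ne.symm h1), if_neg (Ne.symm h2), if_neg (Ne.symm h3), if_neg (Ne.symm h4), if_neg (Ne.symm h5), if_neg (Ne.symm h6), if_neg (Ne.symm h7), if_neg (Ne.symm h8), if_neg (Ne.symm h9), if_neg (Ne.symm h10), if_neg (Ne.symm h11), if_neg (Ne.symm h12), if_neg (Ne.symm h13), if_neg (Ne.symm h14), if_neg (Ne.symm h15)]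
  simp only [Bool.cond_eq_ite, beq_iff_eq, List.findIdx_nil]
  rw [if_neg (Ne.symm h0), if_neg (Ne.symm h1), if_neg (Ne.symm h2), if_neg (Ne.symm h3), if_neg (Ne.symm h4), if_neg (Ne.symm h5), if_neg (Ne.symm h6), if_neg (Ne.symm h7), if_neg (Ne.symm h8), if_neg (Ne.symm h9), if_neg (Ne.symm h10), if_neg (Ne.symm h11), if_neg (Ne.symm h12), if_neg (Ne.symm h13), if_neg (Ne.symm h14), if_neg (Ne.symm h15)]
  rfl

theorem pvRnk_le (k : String) : pvRnk k ≤ 16 := by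
  rw [pvRnk_eq_idxOf]
  have h := List.idxOf_le_length (l := pvPreferred) (a := k)
  simpa [pvPreferred] using h

-- the buckets list as a function of the first-seen key list
def pvBuckets (L : List String) : List (List String) :=
  (List.range 17).map (fun i => L.filter (fun k => pvRnk k == i))

theorem pvBuckets_nil : pvBuckets [] = List.replicate (pvN + 1) [] := by decide

theorem pvBuckets_getD (L : List String) (k : String) :
    (pvBuckets L).getD (pvRnk k) [] = L.filter (fun k' => pvRnk k' == pvRnk k) := by
  have hk : pvRnk k < 17 := by have := pvRnk_le k; omega
  rw [List.getD_eq_getElem?_getD, List.getElem?_eq_getElem (by simp [pvBuckets]; omega)]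
  simp [pvBuckets]

theorem pvBuckets_append (L : List String) (k : String) :
    pvBuckets (L ++ [k]) = (pvBuckets L).set (pvRnk k) ((pvBuckets L).getD (pvRnk k) [] ++ [k]) := by
  apply List.ext_getElem
  · simp [pvBuckets]
  intro i h1 h2
  rw [List.getElem_set]
  have h17 : i < 17 := by simpa [pvBuckets] using h1
  split
  · next he =>
    rw [pvBuckets_getD]
    simp only [pvBuckets, List.getElem_map, List.getElem_range, List.filter_append]
    subst he
    simp
  · next hne =>
    simp only [pvBuckets, List.getElem_map, List.getElem_range, List.filter_append]
    simp [hne]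

-- a nodup list filtered down to one element
theorem filter_beq_of_nodup (L : List String) (h : L.Nodup) (p : String) :
    L.filter (fun k => p == k) = if p ∈ L then [p] else [] := by
  induction L with
  | nil => simp
  | cons x t ih =>
    rcases List.nodup_cons.mp h with ⟨hx, ht⟩
    by_cases hxp : x = p
    · subst hxp
      simp [ih ht, hx]
    · simp [ih ht, Ne.symm hxp]

-- concatenating the rank buckets = preferred-then-extras
theorem bucket_split (P L : List String) (hP : P.Nodup) (hL : L.Nodup) :
    ((List.range (P.length + 1)).map (fun i => L.filter (fun k => P.idxOf k == i))).flatten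
      = P.filter (fun p => p ∈ L) ++ L.filter (fun k => ¬ k ∈ P) := by
  induction P generalizing L with
  | nil => simp
  | cons p P' ih =>
    rcases List.nodup_cons.mp hP with ⟨hp, hP'⟩
    have hL' : (L.filter (fun k => !(k == p))).Nodup := List.Nodup.filter _ hL
    -- peel bucket 0
    rw [show (p :: P').length + 1 = (P'.length + 1) + 1 from by simp, List.range_succ_eq_map]
    simp only [List.map_cons, List.flatten_cons, List.map_map]
    have hb0 : L.filter (fun k => (p :: P').idxOf k == 0) = L.filter (fun k => p == k) := by
      apply List.filter_congr
      intro k _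
      by_cases hkp : p = k
      · subst hkp; simp
      · simp [hkp]
    have hshift : ∀ i : Nat, L.filter (fun k => (p :: P').idxOf k == i + 1)
        = (L.filter (fun k => !(k == p))).filter (fun k => P'.idxOf k == i) := by
      intro i
      rw [List.filter_filter]
      apply List.filter_congr
      intro k _
      by_cases hkp : p = k
      · subst hkp; simp
      · simp [hkp, Ne.symm hkp]
    have hmaps : ((List.range (P'.length + 1)).map
          ((fun i => L.filter (fun k => (p :: P').idxOf k == i)) ∘ Nat.succ)).flatten
        = ((List.range (P'.length + 1)).map
          (fun i => (L.filter (fun k => !(k == p))).filter (fun k => P'.idxOf k == i))).flatten := by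
      congr 1
      apply List.map_congr_left
      intro i _
      simpa using hshift i
    rw [hb0, hmaps, ih (L.filter (fun k => !(k == p))) hP' hL', filter_beq_of_nodup L hL p]
    -- now pure rearrangement
    have h1 : P'.filter (fun q => q ∈ L.filter (fun k => !(k == p))) = P'.filter (fun q => q ∈ L) := by
      apply List.filter_congr
      intro q hq
      have hqp : q ≠ p := fun he => hp (he ▸ hq)
      simp [List.mem_filter, hqp]
    have h2 : (L.filter (fun k => !(k == p))).filter (fun k => ¬ k ∈ P') = L.filter (fun k => ¬ k ∈ (p :: P')) := by
      rw [List.filter_filter]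
      apply List.filter_congr
      intro k _
      by_cases hkp : k = p
      · subst hkp; simp
      · simp [hkp]
    rw [h1, h2]
    by_cases hpl : p ∈ L
    · simp [hpl]
    · simp [hpl]

theorem pvBuckets_flatten (L : List String) (hL : L.Nodup) :
    (pvBuckets L).flatten = pvPreferred.filter (fun p => p ∈ L) ++ L.filter (fun k => ¬ k ∈ pvPreferred) := by
  have h17 : (17 : Nat) = pvPreferred.length + 1 := by decide
  unfold pvBuckets
  simp only [pvRnk_eq_idxOf]
  rw [h17]
  exact bucket_split pvPreferred L (by decide) hL

-- the dedup-append step of A's key-collection loops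
def pvStepA (acc : List String) (kv : String × String) : List String :=
  if kv.1 ∈ acc then acc else acc ++ [kv.1]

theorem pvStepA_nodup (acc : List String) (kv : String × String) (h : acc.Nodup) : (pvStepA acc kv).Nodup := by
  unfold pvStepA
  split
  · exact h
  · next hmem =>
      simp only [List.nodup_append, h, true_and]
      refine ⟨List.nodup_singleton _, ?_⟩
      intro a ha b hb
      rw [List.mem_singleton] at hb
      subst hb
      intro hab
      exact hmem (hab ▸ ha)

theorem foldl_pvStepA_nodup (r : List (String × String)) (acc : List String) (h : acc.Nodup) :
    (r.foldl pvStepA acc).Nodup := by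
  induction r generalizing acc with
  | nil => exact h
  | cons kv t ih => exact ih _ (pvStepA_nodup acc kv h)

-- one row of B's loop tracks A's all_keys and keeps buckets = pvBuckets
theorem inner_inv (r : List (String × String)) (L : List String) (h : L.Nodup) :
    r.foldl (fun (st : PySem.Set String × List (List String)) kv =>
        if PySem.Set.contains st.1 kv.1 then st
        else (PySem.Set.add st.1 kv.1,
              st.2.set (pvRnk kv.1) (st.2.getD (pvRnk kv.1) [] ++ [kv.1]))) (L, pvBuckets L)
      = (r.foldl pvStepA L, pvBuckets (r.foldl pvStepA L)) := by
  induction r generalizing L with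
  | nil => rfl
  | cons kv t ih =>
    simp only [List.foldl_cons]
    by_cases hm : kv.1 ∈ L
    · have hs : pvStepA L kv = L := by simp [pvStepA, hm]
      rw [show (if PySem.Set.contains (L, pvBuckets L).1 kv.1 then (L, pvBuckets L)
            else (PySem.Set.add (L, pvBuckets L).1 kv.1,
              (L, pvBuckets L).2.set (pvRnk kv.1) ((L, pvBuckets L).2.getD (pvRnk kv.1) [] ++ [kv.1])))
          = (L, pvBuckets L) from by simp [hm], hs]
      exact ih L h
    · have hs : pvStepA L kv = L ++ [kv.1] := by simp [pvStepA, hm]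
      rw [show (if PySem.Set.contains (L, pvBuckets L).1 kv.1 then (L, pvBuckets L)
            else (PySem.Set.add (L, pvBuckets L).1 kv.1,
              (L, pvBuckets L).2.set (pvRnk kv.1) ((L, pvBuckets L).2.getD (pvRnk kv.1) [] ++ [kv.1])))
          = (L ++ [kv.1], pvBuckets (L ++ [kv.1])) from by
            simp [hm, PySem.Set.add, PySem.Set.contains, pvBuckets_append], hs]
      have hnd : (L ++ [kv.1]).Nodup := by
        simp only [List.nodup_append, h, true_and]
        refine ⟨List.nodup_singleton _, ?_⟩
        intro a ha b hb
        rw [List.mem_singleton] at hb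
        subst hb
        intro hab
        exact hm (hab ▸ ha)
      exact ih _ hnd

theorem outer_inv (rows : List (List (String × String))) (L : List String) (h : L.Nodup) :
    rows.foldl (fun st r =>
        r.foldl (fun (st : PySem.Set String × List (List String)) kv =>
          if PySem.Set.contains st.1 kv.1 then st
          else (PySem.Set.add st.1 kv.1,
                st.2.set (pvRnk kv.1) (st.2.getD (pvRnk kv.1) [] ++ [kv.1]))) st) (L, pvBuckets L)
      = (rows.foldl (fun acc r => r.foldl pvStepA acc) L,
         pvBuckets (rows.foldl (fun acc r => r.foldl pvStepA acc) L)) := by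
  induction rows generalizing L with
  | nil => rfl
  | cons r t ih =>
    simp only [List.foldl_cons]
    rw [inner_inv r L h]
    exact ih _ (foldl_pvStepA_nodup r L h)

-- A's extend loop is append-the-new-extras
theorem extend_eq (M : List String) (hM : M.Nodup) (o : List String) :
    M.foldl (fun ordered k => if k ∈ ordered then ordered else ordered ++ [k]) o
      = o ++ M.filter (fun k => ¬ k ∈ o) := by
  induction M generalizing o with
  | nil => simp
  | cons x t ih =>
    rcases List.nodup_cons.mp hM with ⟨hx, ht⟩
    by_cases hxo : x ∈ o
    · simp only [List.foldl_cons, if_pos hxo, List.filter_cons]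
      rw [ih ht o]
      simp [hxo]
    · simp only [List.foldl_cons, if_neg hxo, List.filter_cons]
      rw [ih ht (o ++ [x])]
      have hcong : t.filter (fun k => ¬ k ∈ o ++ [x]) = t.filter (fun k => ¬ k ∈ o) := by
        apply List.filter_congr
        intro a ha
        have : a ≠ x := fun he => hx (he ▸ ha)
        simp [List.mem_append, this]
      rw [hcong]
      simp [hxo, List.append_assoc]

theorem foldl_rows_nodup (rows : List (List (String × String))) (acc : List String) (h : acc.Nodup) :
    (rows.foldl (fun acc r => r.foldl pvStepA acc) acc).Nodup := by
  induction rows generalizing acc with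
  | nil => exact h
  | cons r t ih => exact ih _ (foldl_pvStepA_nodup r acc h)

-- ===== VERDICT (by name: the statement is the Claim_ definition above) =====
theorem select_entity_tags_fields_py_spec : Claim_equal_select_entity_tags_fields_py := by
  intro rows _
  unfold Spec_select_entity_tags_fields_py select_entity_tags_fields_py select_entity_tags_fields_py_alt
  by_cases hr : rows = []
  · simp [hr]
  · simp only [if_neg hr]
    have hstep : (fun (acc : List String) (kv : String × String) => if kv.1 ∈ acc then acc else acc ++ [kv.1]) = pvStepA := rfl
    rw [hstep]
    set L := rows.foldl (fun acc r => r.foldl pvStepA acc) [] with hLdef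
    have hnd : L.Nodup := foldl_rows_nodup rows [] List.nodup_nil
    have hB : rows.foldl (fun st r =>
          r.foldl (fun (st : PySem.Set String × List (List String)) kv =>
            if PySem.Set.contains st.1 kv.1 then st
            else (PySem.Set.add st.1 kv.1,
                  st.2.set (pvRnk kv.1) (st.2.getD (pvRnk kv.1) [] ++ [kv.1]))) st)
          (PySem.Set.empty, List.replicate (pvN + 1) [])
        = (L, pvBuckets L) := by
      rw [show (PySem.Set.empty, List.replicate (pvN + 1) ([] : List String)) = (([] : List String), pvBuckets []) from by rw [pvBuckets_nil]; rfl]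
      exact outer_inv rows [] List.nodup_nil
    rw [hB]
    rw [PySem.List.foldl_append_eq_flatten]
    rw [extend_eq L hnd]
    rw [pvBuckets_flatten L hnd]
    have hextras : L.filter (fun k => ¬ k ∈ pvPreferred.filter (fun k => k ∈ L))
        = L.filter (fun k => ¬ k ∈ pvPreferred) := by
      apply List.filter_congr
      intro k hk
      simp [List.mem_filter, hk]
    rw [hextras]
    simp
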